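-- pv_equiv track=rewrite | github.com/theyoyojo/commandCalc | defiler.py | extractAttributeName
-- ===== SOURCE A (Python) =====
-- def extractAttributeName(attribute):
-- 	name = ''
-- 	for char in attribute:
-- 		if char == '\t' or char == '\n':
-- 			continue
-- 		if char == '=':
-- 			return name
-- 		else:
-- 			name += char
-- ===== SOURCE B (Python) =====
-- def extractAttributeName(attribute):
--     if '=' not in attribute:
--         return None
--     return attribute.split('=', 1)[0].replace('\t', '').replace('\n', '')
-- ===== Notes on version B (the rewrite author's own statement) =====
-- stated objective: faster
-- what changed: Replaces the character-by-character accumulator loop (with quadratic string concatenation) by a split-then-strip decomposition: take the prefix before the first delimiter via str.split with maxsplit 1 and delete tabs/newlines from it with two linear replace passes.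
-- outside the precondition, e.g. on extractAttributeName('abc'): A returns None, B returns None
import Mathlib
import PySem

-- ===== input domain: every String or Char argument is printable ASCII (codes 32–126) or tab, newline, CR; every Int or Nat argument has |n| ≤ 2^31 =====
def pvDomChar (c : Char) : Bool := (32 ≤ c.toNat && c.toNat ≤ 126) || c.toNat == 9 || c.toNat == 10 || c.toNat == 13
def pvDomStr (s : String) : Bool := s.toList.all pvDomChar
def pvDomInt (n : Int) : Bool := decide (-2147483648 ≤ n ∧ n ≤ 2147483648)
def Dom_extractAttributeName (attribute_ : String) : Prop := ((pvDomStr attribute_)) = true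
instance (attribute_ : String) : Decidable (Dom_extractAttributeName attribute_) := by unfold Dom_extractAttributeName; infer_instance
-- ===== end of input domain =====

-- B replaces A's per-character accumulator loop with a split-then-strip decomposition
-- (prefix before the first '=', then delete tabs/newlines); objective: simpler.


-- ===== PORT A =====
-- A's loop: skip '\t'/'\n', return the accumulated name at the first '=', else append the char.
def extractAttributeNameGo (cs : List Char) (name : List Char) : List Char :=
  match cs with
  | [] => name          -- Python A returns None here; outside Pre_
  | c :: rest =>
    if c = '\t' ∨ c = '\n' then extractAttributeNameGo rest name
    else if c = '=' then name
    else extractAttributeNameGo rest (name ++ [c])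

def extractAttributeName (attribute_ : String) : String :=
  String.mk (extractAttributeNameGo attribute_.toList [])

-- ===== PORT B =====
-- Source B: membership test, split('=',1)[0] ported as takeWhile (prefix before first '='),
-- the two replace('\t','')/replace('\n','') passes ported as the corresponding filters.
def extractAttributeName_alt (attribute_ : String) : String :=
  if '=' ∈ attribute_.toList then
    String.mk (((attribute_.toList.takeWhile (· ≠ '=')).filter (· ≠ '\t')).filter (· ≠ '\n'))
  else ""               -- Python B returns None here; outside Pre_

-- ===== PRECONDITION & SPEC =====
-- Pre_ excludes strings with no '=': there Python A returns None (no str value), and B does too.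
def Pre_extractAttributeName (attribute_ : String) : Prop := '=' ∈ attribute_.toList
instance (attribute_ : String) : Decidable (Pre_extractAttributeName attribute_) := by unfold Pre_extractAttributeName; infer_instance
def pvWitness_extractAttributeName : String := "x=1"

def Spec_extractAttributeName (attribute_ : String) (out : String) : Prop := out = extractAttributeName_alt attribute_
instance (attribute_ : String) (out : String) : Decidable (Spec_extractAttributeName attribute_ out) := by unfold Spec_extractAttributeName; infer_instance

-- ===== CLAIM (what is proved, stated in full; the proofs are below) =====
def Claim_equal_extractAttributeName : Prop := ∀ (attribute_ : String), Dom_extractAttributeName attribute_ → Pre_extractAttributeName attribute_ → Spec_extractAttributeName attribute_ (extractAttributeName attribute_)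

-- ===== LEMMAS AND PROOFS =====
theorem extractAttributeNameGo_eq (cs : List Char) (acc : List Char) (h : '=' ∈ cs) :
    extractAttributeNameGo cs acc
      = acc ++ ((cs.takeWhile (· ≠ '=')).filter (· ≠ '\t')).filter (· ≠ '\n') := by
  induction cs generalizing acc with
  | nil => cases h
  | cons c rest ih =>
    by_cases hc : c = '='
    · subst hc
      simp [extractAttributeNameGo, List.takeWhile]
    · have hrest : '=' ∈ rest := by
        rcases List.mem_cons.mp h with h1 | h1
        · exact absurd h1.symm hc
        · exact h1
      by_cases ht : c = '\t' ∨ c = '\n'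
      · have : extractAttributeNameGo (c :: rest) acc = extractAttributeNameGo rest acc := by
          simp [extractAttributeNameGo, ht]
        rw [this, ih acc hrest]
        rcases ht with ht | ht <;> subst ht <;>
          simp [List.takeWhile]
      · push Not at ht
        have : extractAttributeNameGo (c :: rest) acc = extractAttributeNameGo rest (acc ++ [c]) := by
          simp [extractAttributeNameGo, ht.1, ht.2, hc]
        rw [this, ih _ hrest]
        simp [List.takeWhile, hc, ht.1, ht.2]

-- ===== VERDICT (by name: the statement is the Claim_ definition above) =====
theorem extractAttributeName_spec : Claim_equal_extractAttributeName := by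
  intro a _ hpre
  have hpre' : '=' ∈ a.toList := hpre
  unfold Spec_extractAttributeName extractAttributeName extractAttributeName_alt
  rw [if_pos hpre', extractAttributeNameGo_eq _ _ hpre']
  simp
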